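-- pv_equiv track=rewrite | github.com/GitNMLee/Console2048 | 2048.py | shift_left
-- ===== SOURCE A (Python) =====
-- num_of_rows = 4
--
-- num_of_cols = 4
--
-- def swap(r1,c1,r2,c2,board):
--     # Given two coordinates on the 2D board, swap them
--     temp = board[r1][c1]
--     board[r1][c1] = board[r2][c2]
--     board[r2][c2] = temp
--     return board
--
-- def shift_left(board):
--     # Shift all cells to the left side of the board
--     for row in range(num_of_rows):
--         for col in range(num_of_cols-1):
--             if (board[row][col] == 0):
--                 # If cell is empty
--                 search_col = col + 1
--                 while (search_col != num_of_cols):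
--                     # Search for non-empty cells to swap
--                     if (board[row][search_col] != 0):
--                         board = swap(row,col,row,search_col,board)
--                         break
--                     search_col += 1
--     # Return modified board
--     return board
-- ===== SOURCE B (Python) =====
-- num_of_rows = 4
--
-- num_of_cols = 4
--
-- def shift_left(board):
--     # Shift all cells to the left: collect nonzero values per row, then refill.
--     for row in range(num_of_rows):
--         vals = [board[row][c] for c in range(num_of_cols) if board[row][c] != 0]
--         for c in range(num_of_cols):
--             board[row][c] = vals[c] if c < len(vals) else 0
--     return board
-- ===== Notes on version B (the rewrite author's own statement) =====
-- stated objective: simpler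
-- what changed: Replaces A's per-cell search-and-swap (nested loop with an inner while hunting the next nonzero cell) by a per-row collect-then-fill pass: gather the nonzero values of the row, then overwrite the row with them followed by zeros.
import Mathlib
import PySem

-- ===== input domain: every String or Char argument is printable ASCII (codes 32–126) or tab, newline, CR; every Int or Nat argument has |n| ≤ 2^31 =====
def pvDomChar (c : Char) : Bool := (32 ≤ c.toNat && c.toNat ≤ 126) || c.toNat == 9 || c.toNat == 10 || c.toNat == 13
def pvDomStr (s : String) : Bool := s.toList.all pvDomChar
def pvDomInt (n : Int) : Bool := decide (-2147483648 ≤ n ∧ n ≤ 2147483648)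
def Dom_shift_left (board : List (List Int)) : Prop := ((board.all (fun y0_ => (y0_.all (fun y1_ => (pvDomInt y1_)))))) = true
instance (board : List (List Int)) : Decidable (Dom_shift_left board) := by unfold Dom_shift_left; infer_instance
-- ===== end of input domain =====

-- B replaces A's per-cell search-and-swap by a per-row collect-nonzeros-then-refill pass (same values, same in-place mutation); equivalence is about the returned board.

-- ===== PORT A =====
-- board[r][c] read; out-of-range reads never happen inside Pre_, default 0/[] only makes the port total
def get2 (bd : List (List Int)) (r c : Nat) : Int := (bd.getD r []).getD c 0

-- board[r][c] = v
def set2 (bd : List (List Int)) (r c : Nat) (v : Int) : List (List Int) :=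
  bd.set r ((bd.getD r []).set c v)

-- Python swap(r1,c1,r2,c2,board)
def swapP (r1 c1 r2 c2 : Nat) (bd : List (List Int)) : List (List Int) :=
  let temp := get2 bd r1 c1
  let bd1 := set2 bd r1 c1 (get2 bd r2 c2)
  set2 bd1 r2 c2 temp

-- the inner 'while search_col != num_of_cols' loop of A (sc starts at col+1 <= 4, so '4 <= sc' = 'sc = 4')
def whileSearch (bd : List (List Int)) (row col sc : Nat) : List (List Int) :=
  if 4 ≤ sc then bd
  else if get2 bd row sc ≠ 0 then swapP row col row sc bd
  else whileSearch bd row col (sc + 1)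
termination_by 4 - sc
decreasing_by omega

-- body of A's 'for row' loop
def rowStepA (b : List (List Int)) (row : Nat) : List (List Int) :=
  (List.range 3).foldl (fun b col =>
    if get2 b row col = 0 then whileSearch b row col (col + 1) else b) b

def shift_left (board : List (List Int)) : List (List Int) :=
  (List.range 4).foldl rowStepA board

-- ===== PORT B =====
-- body of B's 'for row' loop: collect the row's nonzero values, then refill the row
def rowStepB (b : List (List Int)) (row : Nat) : List (List Int) :=
  let vals := (((List.range 4).map (fun c => get2 b row c)).filter (fun v => v != 0))
  (List.range 4).foldl (fun b c =>
    set2 b row c (if c < vals.length then vals.getD c 0 else 0)) b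

def shift_left_alt (board : List (List Int)) : List (List Int) :=
  (List.range 4).foldl rowStepB board

-- ===== PRECONDITION & SPEC =====
-- Pre_ excludes boards with fewer than 4 rows or a short first-four row, on which A raises IndexError;
-- it also excludes boards whose short rows happen to dodge every access (no zero before the short spot),
-- where A returns the board unchanged by accident of its search pattern while B raises IndexError.
def Pre_shift_left (board : List (List Int)) : Prop :=
  4 ≤ board.length ∧ ∀ i, i < 4 → 4 ≤ (board.getD i []).length
instance (board : List (List Int)) : Decidable (Pre_shift_left board) := by
  unfold Pre_shift_left; infer_instance

def pvWitness_shift_left : List (List Int) :=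
  [[0, 2, 0, 2], [4, 0, 0, 4], [0, 0, 0, 8], [1, 2, 3, 4]]

def Spec_shift_left (board : List (List Int)) (out : List (List Int)) : Prop := out = shift_left_alt board
instance (board : List (List Int)) (out : List (List Int)) : Decidable (Spec_shift_left board out) := by unfold Spec_shift_left; infer_instance

-- ===== CLAIM (what is proved, stated in full; the proofs are below) =====
def Claim_equal_shift_left : Prop := ∀ (board : List (List Int)), Dom_shift_left board → Pre_shift_left board → Spec_shift_left board (shift_left board)

-- ===== LEMMAS AND PROOFS =====

-- row-level mirror of A's inner while loop
def rowWhile (r : List Int) (col sc : Nat) : List Int :=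
  if 4 ≤ sc then r
  else if r.getD sc 0 ≠ 0 then (r.set col (r.getD sc 0)).set sc (r.getD col 0)
  else rowWhile r col (sc + 1)
termination_by 4 - sc
decreasing_by omega

-- row-level mirror of A's col loop
def rowA (r : List Int) : List Int :=
  (List.range 3).foldl (fun r col =>
    if r.getD col 0 = 0 then rowWhile r col (col + 1) else r) r

-- row-level mirror of B's per-row action
def rowB (r : List Int) : List Int :=
  let vals := (((List.range 4).map (fun c => r.getD c 0)).filter (fun v => v != 0))
  (List.range 4).foldl (fun r c =>
    r.set c (if c < vals.length then vals.getD c 0 else 0)) r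

lemma getD_set_self (bd : List (List Int)) (i : Nat) (r : List Int) (h : i < bd.length) :
    (bd.set i r).getD i [] = r := by
  simp [List.getD_eq_getElem?_getD, h]

lemma getD_set_ne (bd : List (List Int)) (i j : Nat) (r : List Int) (h : i ≠ j) :
    (bd.set i r).getD j [] = bd.getD j [] := by
  simp [List.getD_eq_getElem?_getD, List.getElem?_set_ne h]

lemma set_getD_self (bd : List (List Int)) (i : Nat) (h : i < bd.length) :
    bd.set i (bd.getD i []) = bd := by
  apply List.ext_getElem
  · simp
  · intro j h1 h2
    rw [List.getElem_set]
    split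
    · subst ‹i = j›; rw [List.getD_eq_getElem _ _ h]
    · rfl

lemma get2_set (bd : List (List Int)) (i c : Nat) (r : List Int) (h : i < bd.length) :
    get2 (bd.set i r) i c = r.getD c 0 := by
  unfold get2; rw [getD_set_self bd i r h]

lemma set2_set (bd : List (List Int)) (i c : Nat) (r : List Int) (v : Int) (h : i < bd.length) :
    set2 (bd.set i r) i c v = bd.set i (r.set c v) := by
  unfold set2; rw [getD_set_self bd i r h, List.set_set]

lemma whileSearch_set (bd : List (List Int)) (i : Nat) (h : i < bd.length)
    (r : List Int) (col sc : Nat) :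
    whileSearch (bd.set i r) i col sc = bd.set i (rowWhile r col sc) := by
  unfold whileSearch rowWhile
  split
  · rfl
  · rw [get2_set bd i sc r h]
    split
    · show swapP i col i sc (bd.set i r) = _
      unfold swapP
      rw [get2_set bd i col r h, get2_set bd i sc r h, set2_set bd i col r _ h,
        set2_set bd i sc (r.set col (r.getD sc 0)) _ h]
    · exact whileSearch_set bd i h r col (sc + 1)
termination_by 4 - sc
decreasing_by omega

lemma colsA_set (bd : List (List Int)) (i : Nat) (h : i < bd.length)
    (l : List Nat) (r : List Int) :
    l.foldl (fun b col => if get2 b i col = 0 then whileSearch b i col (col + 1) else b) (bd.set i r)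
      = bd.set i (l.foldl (fun r col => if r.getD col 0 = 0 then rowWhile r col (col + 1) else r) r) := by
  induction l generalizing r with
  | nil => rfl
  | cons c cs ih =>
    simp only [List.foldl_cons, get2_set bd i c r h]
    split
    · rw [whileSearch_set bd i h r c (c+1)]; exact ih _
    · exact ih r

lemma colsB_set (bd : List (List Int)) (i : Nat) (h : i < bd.length)
    (v : Nat → Int) (l : List Nat) (r : List Int) :
    l.foldl (fun b c => set2 b i c (v c)) (bd.set i r)
      = bd.set i (l.foldl (fun r c => r.set c (v c)) r) := by
  induction l generalizing r with
  | nil => rfl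
  | cons c cs ih =>
    simp only [List.foldl_cons, set2_set bd i c r (v c) h]
    exact ih _

lemma colsB_init (bd : List (List Int)) (i : Nat) (h : i < bd.length)
    (v : Nat → Int) (l : List Nat) :
    l.foldl (fun b c => set2 b i c (v c)) bd
      = bd.set i (l.foldl (fun r c => r.set c (v c)) (bd.getD i [])) := by
  conv_lhs => rw [← set_getD_self bd i h]
  exact colsB_set bd i h v l _

lemma rowStepA_eq (bd : List (List Int)) (i : Nat) (h : i < bd.length) :
    rowStepA bd i = bd.set i (rowA (bd.getD i [])) := by
  unfold rowStepA
  conv_lhs => rw [← set_getD_self bd i h]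
  exact colsA_set bd i h _ _

lemma rowStepB_eq (bd : List (List Int)) (i : Nat) (h : i < bd.length) :
    rowStepB bd i = bd.set i (rowB (bd.getD i [])) := by
  unfold rowStepB
  rw [colsB_init bd i h _ _]
  rfl

lemma row_eq (r : List Int) (h : 4 ≤ r.length) : rowA r = rowB r := by
  match r, h with
  | a :: b :: c :: d :: t, _ =>
    by_cases ha : a = 0 <;> by_cases hb : b = 0 <;> by_cases hc : c = 0 <;> by_cases hd : d = 0 <;>
      simp [rowA, rowB, rowWhile, List.range_succ, ha, hb, hc, hd]

lemma shift_left_eq_sets (bd : List (List Int)) (h : 4 ≤ bd.length) :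
    shift_left bd =
      (((bd.set 0 (rowA (bd.getD 0 []))).set 1 (rowA (bd.getD 1 []))).set 2
        (rowA (bd.getD 2 []))).set 3 (rowA (bd.getD 3 [])) := by
  unfold shift_left
  rw [show (List.range 4) = ([0,1,2,3] : List Nat) from rfl]
  simp only [List.foldl_cons, List.foldl_nil]
  rw [rowStepA_eq bd 0 (by omega)]
  rw [rowStepA_eq _ 1 (by simp; omega), getD_set_ne _ 0 1 _ (by omega)]
  rw [rowStepA_eq _ 2 (by simp; omega), getD_set_ne _ 1 2 _ (by omega),
      getD_set_ne _ 0 2 _ (by omega)]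
  rw [rowStepA_eq _ 3 (by simp; omega), getD_set_ne _ 2 3 _ (by omega),
      getD_set_ne _ 1 3 _ (by omega), getD_set_ne _ 0 3 _ (by omega)]

lemma shift_left_alt_eq_sets (bd : List (List Int)) (h : 4 ≤ bd.length) :
    shift_left_alt bd =
      (((bd.set 0 (rowB (bd.getD 0 []))).set 1 (rowB (bd.getD 1 []))).set 2
        (rowB (bd.getD 2 []))).set 3 (rowB (bd.getD 3 [])) := by
  unfold shift_left_alt
  rw [show (List.range 4) = ([0,1,2,3] : List Nat) from rfl]
  simp only [List.foldl_cons, List.foldl_nil]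
  rw [rowStepB_eq bd 0 (by omega)]
  rw [rowStepB_eq _ 1 (by simp; omega), getD_set_ne _ 0 1 _ (by omega)]
  rw [rowStepB_eq _ 2 (by simp; omega), getD_set_ne _ 1 2 _ (by omega),
      getD_set_ne _ 0 2 _ (by omega)]
  rw [rowStepB_eq _ 3 (by simp; omega), getD_set_ne _ 2 3 _ (by omega),
      getD_set_ne _ 1 3 _ (by omega), getD_set_ne _ 0 3 _ (by omega)]

-- ===== VERDICT (by name: the statement is the Claim_ definition above) =====
theorem shift_left_spec : Claim_equal_shift_left := by
  intro bd _ hpre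
  obtain ⟨hlen, hrows⟩ := hpre
  show shift_left bd = shift_left_alt bd
  rw [shift_left_eq_sets bd hlen, shift_left_alt_eq_sets bd hlen,
      row_eq _ (hrows 0 (by omega)), row_eq _ (hrows 1 (by omega)),
      row_eq _ (hrows 2 (by omega)), row_eq _ (hrows 3 (by omega))]
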